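-- pv_equiv track=rewrite | github.com/kota-kawa/ChatCore-AI | services/web_search.py | _insert_system_context
-- ===== SOURCE A (Python) =====
-- def _insert_system_context(
--     conversation_messages: list[dict[str, str]],
--     context_message: dict[str, str],
-- ) -> list[dict[str, str]]:
--     insert_at = 0
--     while insert_at < len(conversation_messages):
--         if conversation_messages[insert_at].get("role") != "system":
--             break
--         insert_at += 1
--     return [
--         *conversation_messages[:insert_at],
--         context_message,
--         *conversation_messages[insert_at:],
--     ]
-- ===== SOURCE B (Python) =====
-- def _insert_system_context(
--     conversation_messages: list[dict[str, str]],
--     context_message: dict[str, str],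
-- ) -> list[dict[str, str]]:
--     result = []
--     inserted = False
--     for message in conversation_messages:
--         if not inserted and message.get("role") != "system":
--             result.append(context_message)
--             inserted = True
--         result.append(message)
--     if not inserted:
--         result.append(context_message)
--     return result
-- ===== Notes on version B (the rewrite author's own statement) =====
-- stated objective: alternative
-- what changed: Replaced the index-scan-then-triple-splice (while loop computing insert_at, then two slices) with a single pass that builds the output list directly, inserting the context message the first time a non-system message is seen (or at the end).
import Mathlib
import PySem

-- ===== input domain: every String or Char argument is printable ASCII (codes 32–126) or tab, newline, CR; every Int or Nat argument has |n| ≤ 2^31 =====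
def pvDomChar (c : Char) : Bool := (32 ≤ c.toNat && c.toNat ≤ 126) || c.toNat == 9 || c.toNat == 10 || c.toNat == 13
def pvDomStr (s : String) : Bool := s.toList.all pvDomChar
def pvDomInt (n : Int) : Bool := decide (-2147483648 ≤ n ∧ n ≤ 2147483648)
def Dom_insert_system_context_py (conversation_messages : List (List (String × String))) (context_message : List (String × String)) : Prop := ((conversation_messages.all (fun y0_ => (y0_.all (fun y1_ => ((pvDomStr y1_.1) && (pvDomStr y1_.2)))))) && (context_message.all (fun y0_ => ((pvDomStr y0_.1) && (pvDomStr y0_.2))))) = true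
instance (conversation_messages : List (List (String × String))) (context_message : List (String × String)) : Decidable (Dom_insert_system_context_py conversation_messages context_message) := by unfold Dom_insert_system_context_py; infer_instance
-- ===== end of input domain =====

-- B builds the result in one pass with an 'inserted' flag instead of A's index scan plus triple splice; same output.

-- dict.get("role"): first-match lookup in the association list (exact for Python dict, whose keys are unique)
def pvRoleGet? (m : List (String × String)) : Option String :=
  (m.find? (fun p => p.1 == "role")).map (·.2)

-- ===== PORT A =====
-- the while loop counting leading messages with role == "system"
def pvSysPrefixLen (ms : List (List (String × String))) : Nat :=
  match ms with
  | [] => 0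
  | m :: rest => if pvRoleGet? m = some "system" then pvSysPrefixLen rest + 1 else 0

def insert_system_context_py (conversation_messages : List (List (String × String))) (context_message : List (String × String)) : List (List (String × String)) :=
  let insert_at : Nat := pvSysPrefixLen conversation_messages
  PySem.List.slice conversation_messages none (some (insert_at : Int))
    ++ context_message :: PySem.List.slice conversation_messages (some (insert_at : Int)) none

-- ===== PORT B =====
-- the single-pass loop: insert context_message before the first non-system message, else at the end
def pvInsertGo (ms : List (List (String × String))) (ctx : List (String × String)) : List (List (String × String)) :=
  match ms with
  | [] => [ctx]
  | m :: rest => if pvRoleGet? m = some "system" then m :: pvInsertGo rest ctx else ctx :: m :: rest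

def insert_system_context_py_alt (conversation_messages : List (List (String × String))) (context_message : List (String × String)) : List (List (String × String)) :=
  pvInsertGo conversation_messages context_message

-- ===== PRECONDITION & SPEC =====
def Spec_insert_system_context_py (conversation_messages : List (List (String × String))) (context_message : List (String × String)) (out : List (List (String × String))) : Prop := out = insert_system_context_py_alt conversation_messages context_message
instance (conversation_messages : List (List (String × String))) (context_message : List (String × String)) (out : List (List (String × String))) : Decidable (Spec_insert_system_context_py conversation_messages context_message out) := by unfold Spec_insert_system_context_py; infer_instance

-- ===== CLAIM (what is proved, stated in full; the proofs are below) =====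
def Claim_equal_insert_system_context_py : Prop := ∀ (conversation_messages : List (List (String × String))) (context_message : List (String × String)), Dom_insert_system_context_py conversation_messages context_message → Spec_insert_system_context_py conversation_messages context_message (insert_system_context_py conversation_messages context_message)

-- ===== LEMMAS AND PROOFS =====
theorem splice_eq_go (ms : List (List (String × String))) (ctx : List (String × String)) :
    ms.take (pvSysPrefixLen ms) ++ ctx :: ms.drop (pvSysPrefixLen ms) = pvInsertGo ms ctx := by
  induction ms with
  | nil => rfl
  | cons m rest ih =>
    simp only [pvSysPrefixLen, pvInsertGo]
    split
    · simpa using ih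
    · rfl

-- ===== VERDICT (by name: the statement is the Claim_ definition above) =====
theorem insert_system_context_py_spec : Claim_equal_insert_system_context_py := by
  intro ms ctx _
  show insert_system_context_py ms ctx = insert_system_context_py_alt ms ctx
  simp only [insert_system_context_py, insert_system_context_py_alt,
    PySem.List.slice_to_natCast, PySem.List.slice_from_natCast]
  exact splice_eq_go ms ctx
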